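-- pv_equiv track=rewrite | github.com/RikJux/AdventOfCode2022 | day_8/day_8.py | view_to_right
-- ===== SOURCE A (Python) =====
-- def view_to_right(tree_line):
--     tot_visibility = [0] * len(tree_line)
--     for idx, tree in enumerate(tree_line):
--         trees_on_the_right = tree_line[idx + 1:]
--         while len(trees_on_the_right) > 0:
--             tot_visibility[idx] += 1
--             head = trees_on_the_right[0]
--             if head >= tree:
--                 break
--             trees_on_the_right = trees_on_the_right[1:]
--
--     return tot_visibility
-- ===== SOURCE B (Python) =====
-- def view_to_right(tree_line):
--     n = len(tree_line)
--     res = [0] * n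
--     stack = []  # (height, index); heights weakly increasing from top to bottom? enough: nearest blocker
--     for i in range(n - 1, -1, -1):
--         h = tree_line[i]
--         while stack and stack[-1][0] < h:
--             stack.pop()
--         res[i] = (stack[-1][1] - i) if stack else (n - 1 - i)
--         stack.append((h, i))
--     return res
-- ===== Notes on version B (the rewrite author's own statement) =====
-- stated objective: faster
-- what changed: Replaced A's per-tree rightward scan over the remaining slice with a single right-to-left pass maintaining a monotonic stack of (height, index) pairs that yields each tree's nearest blocker directly.
import Mathlib
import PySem

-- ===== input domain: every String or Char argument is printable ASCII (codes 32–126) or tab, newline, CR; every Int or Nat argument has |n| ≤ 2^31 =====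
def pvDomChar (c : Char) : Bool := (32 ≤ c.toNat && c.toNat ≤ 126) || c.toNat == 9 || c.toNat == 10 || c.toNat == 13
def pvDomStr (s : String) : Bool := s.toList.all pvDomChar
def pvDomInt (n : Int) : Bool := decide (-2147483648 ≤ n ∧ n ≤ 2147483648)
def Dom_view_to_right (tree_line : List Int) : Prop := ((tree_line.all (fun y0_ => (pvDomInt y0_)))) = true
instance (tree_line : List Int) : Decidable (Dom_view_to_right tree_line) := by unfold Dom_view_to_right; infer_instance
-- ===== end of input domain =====

-- B replaces A's per-index rightward scan (O(n^2)) by a single right-to-left pass with a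
-- monotonic stack of (height, index) pairs (O(n)); return values proved equal on all inputs.

-- ===== PORT A =====
-- the inner `while` loop of A: walks the slice to the right, incrementing the counter,
-- stopping at the first tree of height ≥ tree (counted) or at the end of the line
def viewWhile (tree : Int) (rest : List Int) (acc : Int) : Int :=
  match rest with
  | [] => acc
  | head :: t => if head ≥ tree then acc + 1 else viewWhile tree t (acc + 1)

-- tree_line[idx+1:] with idx+1 ≥ 0 is exactly List.drop (idx+1)
def view_to_right (tree_line : List Int) : List Int :=
  (List.range tree_line.length).map
    (fun idx => viewWhile (tree_line.getD idx 0) (tree_line.drop (idx + 1)) 0)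

-- ===== PORT B =====
-- `while stack and stack[-1][0] < h: stack.pop()` (stack top = list head)
def popWhile (h : Int) : List (Int × Int) → List (Int × Int)
  | [] => []
  | (x, j) :: s => if x < h then popWhile h s else (x, j) :: s

-- the right-to-left loop of Source B: returns (result for this suffix, stack after it)
def goB : List Int → Int → (List Int × List (Int × Int))
  | [], _ => ([], [])
  | h :: t, i =>
      let p := goB t (i + 1)
      let s := popWhile h p.2
      let d : Int := match s with
        | [] => (t.length : Int)        -- n - 1 - i = number of trees to the right
        | (_, j) :: _ => j - i
      (d :: p.1, (h, i) :: s)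

def view_to_right_alt (tree_line : List Int) : List Int :=
  (goB tree_line 0).1

-- ===== PRECONDITION & SPEC =====
def Spec_view_to_right (tree_line : List Int) (out : List Int) : Prop := out = view_to_right_alt tree_line
instance (tree_line : List Int) (out : List Int) : Decidable (Spec_view_to_right tree_line out) := by unfold Spec_view_to_right; infer_instance

-- ===== CLAIM (what is proved, stated in full; the proofs are below) =====
def Claim_equal_view_to_right : Prop := ∀ (tree_line : List Int), Dom_view_to_right tree_line → Spec_view_to_right tree_line (view_to_right tree_line)

-- ===== LEMMAS AND PROOFS =====

-- A's per-index count, with the accumulator factored out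
def countA (tree : Int) : List Int → Int
  | [] => 0
  | h :: t => if h ≥ tree then 1 else 1 + countA tree t

lemma viewWhile_eq (tree : Int) (rest : List Int) (acc : Int) :
    viewWhile tree rest acc = acc + countA tree rest := by
  induction rest generalizing acc with
  | nil => simp [viewWhile, countA]
  | cons h t ih =>
      simp only [viewWhile, countA]
      split_ifs with hc
      · ring
      · rw [ih]; ring

-- the list A returns, written structurally
def specList : List Int → List Int
  | [] => []
  | h :: t => countA h t :: specList t

lemma view_to_right_eq_specList (tl : List Int) : view_to_right tl = specList tl := by
  induction tl with
  | nil => simp [view_to_right, specList]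
  | cons h t ih =>
      simp only [view_to_right, specList, List.length_cons, List.range_succ_eq_map,
        List.map_cons, List.map_map]
      refine List.cons_eq_cons.mpr ⟨?_, ?_⟩
      · simp [viewWhile_eq]
      · rw [← ih]
        simp only [view_to_right]
        apply List.map_congr_left
        intro idx _
        simp [Function.comp]

-- stack invariant: s answers "first blocker" queries for the suffix t starting at index i
def StackInv (t : List Int) (i : Int) (s : List (Int × Int)) : Prop :=
  ∀ q : Int,
    (popWhile q s = [] → countA q t = (t.length : Int)) ∧
    (∀ x j s', popWhile q s = (x, j) :: s' → countA q t = j - i)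

lemma popWhile_popWhile {h q : Int} (hq : h ≤ q) (s : List (Int × Int)) :
    popWhile q (popWhile h s) = popWhile q s := by
  induction s with
  | nil => rfl
  | cons p s ih =>
      obtain ⟨x, j⟩ := p
      by_cases hx : x < h
      · have hxq : x < q := lt_of_lt_of_le hx hq
        simp [popWhile, hx, hxq, ih]
      · simp [popWhile, hx]

lemma goB_inv (t : List Int) (i : Int) :
    (goB t i).1 = specList t ∧ StackInv t (i - 1) (goB t i).2 := by
  induction t generalizing i with
  | nil =>
      refine ⟨rfl, ?_⟩
      intro q
      constructor
      · intro _; rfl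
      · intro x j s' hx; simp [goB, popWhile] at hx
  | cons h t ih =>
      obtain ⟨ih1, ih2⟩ := ih (i + 1)
      have hsimp : (i + 1) - 1 = i := by ring
      rw [hsimp] at ih2
      have hd : (match popWhile h (goB t (i+1)).2 with
          | [] => ((t.length : Int))
          | (_, j) :: _ => j - i) = countA h t := by
        rcases hp : popWhile h (goB t (i+1)).2 with _ | ⟨⟨x, j⟩, s'⟩
        · have := (ih2 h).1 hp; simp [this]
        · have := (ih2 h).2 x j s' hp; simp [this]
      have hstack : (goB (h :: t) i).2 = (h, i) :: popWhile h (goB t (i+1)).2 := rfl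
      constructor
      · simp only [goB, specList, ih1]
        rw [hd]
      · intro q
        rw [hstack]
        by_cases hq : h < q
        · -- query pops h; reduces to the old stack
          have hpp : popWhile q ((h, i) :: popWhile h (goB t (i+1)).2)
              = popWhile q (goB t (i+1)).2 := by
            simp only [popWhile, if_pos hq]
            exact popWhile_popWhile (le_of_lt hq) _
          have hcnt : countA q (h :: t) = 1 + countA q t := by
            simp [countA, not_le.mpr hq]
          constructor
          · intro hnil
            rw [hpp] at hnil
            have := (ih2 q).1 hnil
            rw [hcnt, this]
            simp
            ring
          · intro x j s' hx
            rw [hpp] at hx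
            have := (ih2 q).2 x j s' hx
            rw [hcnt, this]
            ring
        · -- h blocks the query: top stays, count is 1
          have hkeep : popWhile q ((h, i) :: popWhile h (goB t (i+1)).2)
              = (h, i) :: popWhile h (goB t (i+1)).2 := by
            simp [popWhile, hq]
          constructor
          · intro hnil; rw [hkeep] at hnil; exact absurd hnil (by simp)
          · intro x j s' hx
            rw [hkeep] at hx
            obtain ⟨⟨hx1, hj⟩, -⟩ : (h = x ∧ i = j) ∧ popWhile h (goB t (i+1)).2 = s' := by
              simpa using hx
            subst hj
            have : countA q (h :: t) = 1 := by simp [countA, not_lt.mp hq]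
            rw [this]; ring

lemma alt_eq_specList (tl : List Int) : view_to_right_alt tl = specList tl :=
  (goB_inv tl 0).1

-- ===== VERDICT (by name: the statement is the Claim_ definition above) =====
theorem view_to_right_spec : Claim_equal_view_to_right := by
  intro tl _
  unfold Spec_view_to_right
  rw [view_to_right_eq_specList, alt_eq_specList]
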